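-- pv_equiv track=rewrite | github.com/hzwuhao8/ccc | 2009/j1.py | my_run
-- ===== SOURCE A (Python) =====
-- def my_run(data):
--     prefix_list = [int(x) for x in "9780921418"]
--     data_list = prefix_list + data
--     total = 0
--     for i in range(len(data_list)):
--         if i % 2 == 1:
--             m = 3
--         else:
--             m = 1
--         total += data_list[i] * m
--     return total
-- ===== SOURCE B (Python) =====
-- def my_run(data):
--     prefix_list = [int(x) for x in "9780921418"]
--     data_list = prefix_list + data
--     return sum(data_list[::2]) + 3 * sum(data_list[1::2])
-- ===== Notes on version B (the rewrite author's own statement) =====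
-- stated objective: simpler
-- what changed: Replaces the indexed loop with a per-index parity branch by two stride-2 slice sums (even positions weight 1, odd positions weight 3), keeping the list concatenation unchanged.
import Mathlib
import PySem

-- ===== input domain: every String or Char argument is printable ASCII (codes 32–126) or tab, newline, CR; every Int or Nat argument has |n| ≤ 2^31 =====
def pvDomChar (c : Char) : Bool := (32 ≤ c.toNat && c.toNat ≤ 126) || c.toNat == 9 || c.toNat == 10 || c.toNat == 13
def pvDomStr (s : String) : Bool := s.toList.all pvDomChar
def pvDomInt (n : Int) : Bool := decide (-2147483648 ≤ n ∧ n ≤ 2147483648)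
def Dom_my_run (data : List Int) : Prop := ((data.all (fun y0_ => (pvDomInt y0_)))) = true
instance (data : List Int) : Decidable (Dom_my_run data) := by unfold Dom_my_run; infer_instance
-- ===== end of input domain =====

-- B replaces the parity-branching indexed loop by two stride-2 slice sums (objective: simpler).

-- ===== PORT A =====
def my_run (data : List Int) : Int :=
  let prefix_list : List Int :=
    ("9780921418".toList).map (fun c => (PySem.Int.ofStr? (String.ofList [c])).getD 0)
  let data_list := prefix_list ++ data
  (PySem.List.pyRange 0 (data_list.length) 1).foldl
    (fun total i =>
      let m : Int := if PySem.Int.mod i 2 = 1 then 3 else 1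
      total + PySem.List.pyGetD data_list i 0 * m) 0

-- ===== PORT B =====
def my_run_alt (data : List Int) : Int :=
  let prefix_list : List Int :=
    ("9780921418".toList).map (fun c => (PySem.Int.ofStr? (String.ofList [c])).getD 0)
  let data_list := prefix_list ++ data
  ((PySem.List.slice? data_list none none 2).getD []).sum
    + 3 * ((PySem.List.slice? data_list (some 1) none 2).getD []).sum

-- ===== PRECONDITION & SPEC =====
def Spec_my_run (data : List Int) (out : Int) : Prop := out = my_run_alt data
instance (data : List Int) (out : Int) : Decidable (Spec_my_run data out) := by unfold Spec_my_run; infer_instance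

-- ===== CLAIM (what is proved, stated in full; the proofs are below) =====
def Claim_equal_my_run : Prop := ∀ (data : List Int), Dom_my_run data → Spec_my_run data (my_run data)

-- ===== LEMMAS AND PROOFS =====

-- elements at even / odd positions
mutual
def evL : List Int → List Int
  | [] => []
  | a :: xs => a :: odL xs
def odL : List Int → List Int
  | [] => []
  | _ :: xs => evL xs
end

theorem intmod_natCast_two (k : Nat) : PySem.Int.mod (k : Int) 2 = ((k % 2 : Nat) : Int) := by
  simp [PySem.Int.mod, Int.fmod_eq_emod]

-- A's weighted index sum equals weighted even/odd-position sums (weights generalized so the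
-- one-step induction can swap them).
theorem weight_sum (l : List Int) (x y : Int) :
    ((List.range l.length).map (fun k => l.getD k 0 * (if k % 2 = 1 then x else y))).sum
      = y * (evL l).sum + x * (odL l).sum := by
  induction l generalizing x y with
  | nil => simp [evL, odL]
  | cons a xs ih =>
    have : List.range (xs.length + 1) = 0 :: (List.range xs.length).map Nat.succ :=
      List.range_succ_eq_map
    simp only [List.length_cons, this, List.map_cons, List.map_map, List.sum_cons]
    have h2 : ((List.range xs.length).map
        ((fun k => (a :: xs).getD k 0 * (if k % 2 = 1 then x else y)) ∘ Nat.succ)).sum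
        = ((List.range xs.length).map (fun k => xs.getD k 0 * (if k % 2 = 1 then y else x))).sum := by
      congr 1
      apply List.map_congr_left
      intro k _
      simp only [Function.comp]
      rcases Nat.mod_two_eq_zero_or_one k with h | h <;>
        simp [h, Nat.succ_mod_two_eq_one_iff]
    rw [h2, ih y x]
    simp [evL, odL]
    ring

theorem fold_eq (l : List Int) :
    (PySem.List.pyRange 0 (l.length) 1).foldl
      (fun total i =>
        let m : Int := if PySem.Int.mod i 2 = 1 then 3 else 1
        total + PySem.List.pyGetD l i 0 * m) 0
      = (evL l).sum + 3 * (odL l).sum := by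
  rw [show ((l.length : Int)) = ((l.length : Int) - 0) by ring] at *
  rw [PySem.List.foldl_add ((PySem.List.pyRange 0 ((l.length : Int) - 0) 1))
      (fun i => PySem.List.pyGetD l i 0 * (if PySem.Int.mod i 2 = 1 then 3 else 1)) 0]
  rw [PySem.List.pyRange_one 0 ((l.length : Int) - 0)]
  simp only [sub_zero, Int.toNat_natCast, List.map_map, zero_add]
  have h : ∀ k ∈ List.range l.length,
      ((fun i => PySem.List.pyGetD l i 0 * (if PySem.Int.mod i 2 = 1 then 3 else 1)) ∘
        (fun k : Nat => ((k : Int)))) k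
      = l.getD k 0 * (if k % 2 = 1 then (3 : Int) else 1) := by
    intro k _
    simp only [Function.comp, PySem.List.pyGetD_natCast, intmod_natCast_two]
    rcases Nat.mod_two_eq_zero_or_one k with h | h
    · simp [h]
    · simp [h]
  rw [List.map_congr_left h, weight_sum l 3 1]
  ring

-- step-2 slices characterized as evL / odL
theorem stride_ev : ∀ (l : List Int),
    (List.range ((l.length + 1) / 2)).filterMap (fun k => l[2 * k]?) = evL l
  | [] => by simp [evL]
  | [a] => by simp [evL, odL]
  | a :: b :: xs => by
    have ih := stride_ev xs
    have hc : ((a :: b :: xs).length + 1) / 2 = (xs.length + 1) / 2 + 1 := by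
      simp; omega
    rw [hc, List.range_succ_eq_map, List.filterMap_cons, List.filterMap_map]
    have hfun : ((fun k => (a :: b :: xs)[2 * k]?) ∘ Nat.succ) = (fun k : Nat => xs[2 * k]?) := by
      funext k
      simp [Function.comp, Nat.succ_eq_add_one, show 2 * (k + 1) = 2 * k + 1 + 1 by omega]
    rw [hfun, ih]
    simp [evL, odL]

theorem stride_od : ∀ (l : List Int),
    (List.range (l.length / 2)).filterMap (fun k => l[2 * k + 1]?) = odL l
  | [] => by simp [odL]
  | [a] => by simp [odL, evL]
  | a :: b :: xs => by
    have ih := stride_od xs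
    have hc : (a :: b :: xs).length / 2 = xs.length / 2 + 1 := by simp; omega
    rw [hc, List.range_succ_eq_map, List.filterMap_cons, List.filterMap_map]
    have hfun : ((fun k => (a :: b :: xs)[2 * k + 1]?) ∘ Nat.succ) = (fun k : Nat => xs[2 * k + 1]?) := by
      funext k
      simp [Function.comp, Nat.succ_eq_add_one, show 2 * (k + 1) + 1 = (2 * k + 1) + 1 + 1 by omega]
    rw [hfun, ih]
    simp [evL, odL]

theorem slice_even (l : List Int) : PySem.List.slice? l none none 2 = some (evL l) := by
  rw [← stride_ev l]
  simp only [PySem.List.slice?, PySem.List.sliceIndices]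
  norm_num
  have hr : (if 0 < l.length then (((l.length : Int) + 2 - 1) / 2).toNat else 0) = (l.length + 1) / 2 := by
    split <;> omega
  rw [hr]
  congr 1

theorem slice_odd (l : List Int) : PySem.List.slice? l (some 1) none 2 = some (odL l) := by
  rw [← stride_od l]
  simp only [PySem.List.slice?, PySem.List.sliceIndices]
  norm_num
  match l with
  | [] => simp
  | a :: t =>
    have hmin : min 1 ((a :: t).length : Int) = 1 := by
      simp only [List.length_cons]; omega
    rw [hmin]
    have hr : (if 1 < (a :: t).length then ((((a :: t).length : Int) - 1 + 2 - 1) / 2).toNat else 0)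
        = (a :: t).length / 2 := by
      simp only [List.length_cons]; split <;> omega
    rw [hr]
    congr 1
    funext x
    congr 1
    omega

-- ===== VERDICT (by name: the statement is the Claim_ definition above) =====
theorem my_run_spec : Claim_equal_my_run := by
  intro data _
  unfold Spec_my_run my_run my_run_alt
  simp only []
  rw [fold_eq, slice_even, slice_odd]
  simp
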